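-- pv_equiv track=rewrite | github.com/lsj1137/problem-solving | SWEA/D3/1493. 수의 새로운 연산/수의 새로운 연산.py | nToP
-- ===== SOURCE A (Python) =====
-- def nToP(n):
--     ny,cx,cy = 2,1,1
--     i = 1
--     while i<n:
--         i += 1
--         cx += 1
--         cy -= 1
--         if cy == 0:
--             cy = ny
--             cx = 1
--             ny += 1
--     return (cx,cy)
-- ===== SOURCE B (Python) =====
-- def nToP(n):
--     # O(log n): binary-search the diagonal d with T(d-1) < n <= T(d), then arithmetic.
--     if n < 1:
--         n = 1
--     hi = 1
--     while hi * (hi + 1) < 2 * n: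
--         hi *= 2
--     lo = 1
--     while lo < hi:
--         mid = (lo + hi) // 2
--         if mid * (mid + 1) >= 2 * n:
--             hi = mid
--         else:
--             lo = mid + 1
--     k = n - lo * (lo - 1) // 2
--     return (k, lo - k + 1)
-- ===== Notes on version B (the rewrite author's own statement) =====
-- stated objective: faster
-- what changed: Replaced the step-by-step walk along diagonals with a binary search (with doubling) for the diagonal d satisfying T(d-1) < n <= T(d), then computing the position arithmetically.
import Mathlib
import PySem

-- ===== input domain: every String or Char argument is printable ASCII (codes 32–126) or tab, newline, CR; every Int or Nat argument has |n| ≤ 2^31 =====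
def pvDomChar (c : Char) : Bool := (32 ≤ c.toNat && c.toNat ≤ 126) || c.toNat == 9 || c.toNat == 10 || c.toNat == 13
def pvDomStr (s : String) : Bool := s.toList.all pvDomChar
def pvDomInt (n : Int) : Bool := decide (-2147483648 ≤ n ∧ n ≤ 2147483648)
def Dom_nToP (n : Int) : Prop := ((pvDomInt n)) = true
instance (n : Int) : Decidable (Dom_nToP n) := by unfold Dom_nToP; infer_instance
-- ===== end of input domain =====

-- B replaces A's step-by-step diagonal walk by a binary search for the diagonal plus
-- arithmetic; return-value equivalence is proved on all Int inputs.
-- (The Nat fuel arguments of the loop helpers only make the recursions total; each is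
-- provably enough for its loop to run to completion.)

-- ===== PORT A =====
-- the while loop of A, state (i, ny, cx, cy); fuel = remaining iterations (n - i)
def nToPLoop : Nat → Int → Int → Int → Int → Int → Int × Int
  | 0, _, _, _, cx, cy => (cx, cy)
  | fuel + 1, n, i, ny, cx, cy =>
    if i < n then
      if cy - 1 = 0 then
        nToPLoop fuel n (i + 1) (ny + 1) 1 ny
      else
        nToPLoop fuel n (i + 1) ny (cx + 1) (cy - 1)
    else (cx, cy)

def nToP (n : Int) : List Int :=
  let p := nToPLoop (n - 1).toNat n 1 2 1 1
  [p.1, p.2]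

-- ===== PORT B =====
-- 'while hi*(hi+1) < 2*n: hi *= 2'; fuel n.toNat is enough (hi reaches n in < n doublings)
def nToPAltDouble : Nat → Int → Int → Int
  | 0, _, hi => hi
  | fuel + 1, n, hi =>
    if hi * (hi + 1) < 2 * n then nToPAltDouble fuel n (hi * 2) else hi

-- 'while lo < hi: mid = (lo+hi)//2; ...'; fuel (hi-lo).toNat is enough
def nToPAltBin : Nat → Int → Int → Int → Int
  | 0, _, lo, _ => lo
  | fuel + 1, n, lo, hi =>
    if lo < hi then
      let mid := PySem.Int.floordiv (lo + hi) 2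
      if mid * (mid + 1) ≥ 2 * n then nToPAltBin fuel n lo mid
      else nToPAltBin fuel n (mid + 1) hi
    else lo

def nToP_alt (n : Int) : List Int :=
  let m := if n < 1 then 1 else n
  let hi := nToPAltDouble m.toNat m 1
  let lo := nToPAltBin (hi - 1).toNat m 1 hi
  let k := m - PySem.Int.floordiv (lo * (lo - 1)) 2
  [k, lo - k + 1]

-- ===== PRECONDITION & SPEC =====
def Spec_nToP (n : Int) (out : List Int) : Prop := out = nToP_alt n
instance (n : Int) (out : List Int) : Decidable (Spec_nToP n out) := by unfold Spec_nToP; infer_instance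

-- ===== CLAIM (what is proved, stated in full; the proofs are below) =====
def Claim_equal_nToP : Prop := ∀ (n : Int), Dom_nToP n → Spec_nToP n (nToP n)

-- ===== LEMMAS AND PROOFS =====

-- the per-step transition of A's walk
def pvStep (p : Int × Int) : Int × Int :=
  if p.2 = 1 then (1, p.1 + 1) else (p.1 + 1, p.2 - 1)

theorem pvStep_end (x y : Int) (h : y = 1) : pvStep (x, y) = (1, x + 1) := by
  simp [pvStep, h]

theorem pvStep_mid (x y : Int) (h : y ≠ 1) : pvStep (x, y) = (x + 1, y - 1) := by
  simp [pvStep, h]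

-- A's loop iterates pvStep, provided the invariant ny = cx + cy holds
theorem nToPLoop_iterate (m : Nat) : ∀ (n i ny cx cy : Int), n = i + m → ny = cx + cy →
    nToPLoop m n i ny cx cy = pvStep^[m] (cx, cy) := by
  induction m with
  | zero =>
    intro n i ny cx cy hn _
    simp [nToPLoop]
  | succ m ih =>
    intro n i ny cx cy hn hinv
    rw [nToPLoop, if_pos (by omega), Function.iterate_succ_apply]
    by_cases hc : cy - 1 = 0
    · rw [if_pos hc, pvStep_end cx cy (by omega)]
      have hcx : cx + 1 = ny := by omega
      rw [hcx]
      exact ih n (i + 1) (ny + 1) 1 ny (by omega) (by omega)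
    · rw [if_neg hc, pvStep_mid cx cy (by omega)]
      exact ih n (i + 1) ny (cx + 1) (cy - 1) (by omega) (by omega)

theorem nToP_char (n : Int) :
    nToP n = [(pvStep^[(n - 1).toNat] (1, 1)).1, (pvStep^[(n - 1).toNat] (1, 1)).2] := by
  unfold nToP
  by_cases h : n ≤ 1
  · have h0 : (n - 1).toNat = 0 := by omega
    rw [h0]
    simp [nToPLoop]
  · rw [nToPLoop_iterate (n - 1).toNat n 1 2 1 1 (by omega) (by omega)]

-- the doubling loop, given enough fuel, returns r with 0 < r and 2*n ≤ r*(r+1)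
theorem double_spec (fuel : Nat) : ∀ (n hi : Int), 0 < hi → (n - hi).toNat ≤ fuel →
    0 < nToPAltDouble fuel n hi ∧
      2 * n ≤ nToPAltDouble fuel n hi * (nToPAltDouble fuel n hi + 1) := by
  induction fuel with
  | zero =>
    intro n hi hpos hf
    have h2 : 2 * hi ≤ hi * (hi + 1) := by nlinarith
    exact ⟨hpos, by simp only [nToPAltDouble]; omega⟩
  | succ fuel ih =>
    intro n hi hpos hf
    rw [nToPAltDouble]
    split_ifs with h
    · have h2 : 2 * hi ≤ hi * (hi + 1) := by nlinarith
      exact ih n (hi * 2) (by omega) (by omega)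
    · exact ⟨hpos, by omega⟩

-- the binary search, given enough fuel, returns r with (r-1)*r < 2*n ≤ r*(r+1), 0 < r
theorem bin_spec (fuel : Nat) : ∀ (n lo hi : Int), (hi - lo).toNat ≤ fuel →
    0 < lo → lo ≤ hi → 2 * n ≤ hi * (hi + 1) → (lo - 1) * lo < 2 * n →
    0 < nToPAltBin fuel n lo hi ∧
      (nToPAltBin fuel n lo hi - 1) * nToPAltBin fuel n lo hi < 2 * n ∧
      2 * n ≤ nToPAltBin fuel n lo hi * (nToPAltBin fuel n lo hi + 1) := by
  induction fuel with
  | zero =>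
    intro n lo hi hf h1 h2 h3 h4
    have hlo : lo = hi := by omega
    exact ⟨h1, by simp only [nToPAltBin]; exact h4, by simp only [nToPAltBin]; rw [hlo]; exact h3⟩
  | succ fuel ih =>
    intro n lo hi hf h1 h2 h3 h4
    rw [nToPAltBin]
    by_cases h : lo < hi
    · simp only [if_pos h]
      have hb := PySem.Int.floordiv_two_mid_bounds (le_of_lt h)
      have hlt : PySem.Int.floordiv (lo + hi) 2 < hi := by
        rw [PySem.Int.floordiv_lt_iff_lt_mul (by omega : (0:Int) < 2)]; omega
      split_ifs with hc
      · exact ih n lo _ (by omega) h1 (by omega) hc h4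
      · push Not at hc
        exact ih n (_ + 1) hi (by omega) (by omega) (by omega) h3 (by nlinarith)
    · simp only [if_neg h]
      have hlo : lo = hi := by omega
      exact ⟨h1, h4, by rw [hlo]; exact h3⟩

-- the diagonal characterized by (d-1)d < 2n ≤ d(d+1) is unique among positives
theorem diag_unique (d d' n : Int) (hd : 0 < d) (hd' : 0 < d')
    (h1 : (d - 1) * d < 2 * n) (h2 : 2 * n ≤ d * (d + 1))
    (h3 : (d' - 1) * d' < 2 * n) (h4 : 2 * n ≤ d' * (d' + 1)) : d = d' := by
  by_contra hne
  rcases lt_or_gt_of_ne hne with hlt | hlt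
  · have : d * (d + 1) ≤ (d' - 1) * d' := by nlinarith
    omega
  · have : d' * (d' + 1) ≤ (d - 1) * d := by nlinarith
    omega

theorem floordiv_even (a : Int) (q : Int) (h : a = 2 * q) : PySem.Int.floordiv a 2 = q := by
  rw [PySem.Int.floordiv_eq_iff_of_pos (by omega : (0:Int) < 2)]
  omega

-- characterization of B: for n ≥ 1 its output is [k, d-k+1] for THE diagonal d of n
theorem alt_char (n d : Int) (h1 : 1 ≤ n) (hd : 0 < d)
    (hl : (d - 1) * d < 2 * n) (hr : 2 * n ≤ d * (d + 1)) :
    nToP_alt n = [n - PySem.Int.floordiv (d * (d - 1)) 2,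
                  d - (n - PySem.Int.floordiv (d * (d - 1)) 2) + 1] := by
  unfold nToP_alt
  have hn : ¬ n < 1 := by omega
  simp only [hn, if_false]
  have hdub := double_spec n.toNat n 1 (by omega) (by omega)
  have hbin := bin_spec (nToPAltDouble n.toNat n 1 - 1).toNat n 1 (nToPAltDouble n.toNat n 1)
    (by omega) (by omega) hdub.1 hdub.2 (by omega)
  have heq := diag_unique (nToPAltBin (nToPAltDouble n.toNat n 1 - 1).toNat n 1 (nToPAltDouble n.toNat n 1)) d n
    hbin.1 hd hbin.2.1 hbin.2.2 hl hr
  rw [heq, show d * (d - 1) = (d - 1) * d from by ring]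

theorem exists_diag (n : Int) (h : 1 ≤ n) :
    ∃ d : Int, 0 < d ∧ (d - 1) * d < 2 * n ∧ 2 * n ≤ d * (d + 1) := by
  have hdub := double_spec n.toNat n 1 (by omega) (by omega)
  have hbin := bin_spec (nToPAltDouble n.toNat n 1 - 1).toNat n 1 (nToPAltDouble n.toNat n 1)
    (by omega) (by omega) hdub.1 hdub.2 (by omega)
  exact ⟨_, hbin.1, hbin.2.1, hbin.2.2⟩

-- B agrees with A's clamping of n below 1
theorem alt_clamp (n : Int) (h : n < 1) : nToP_alt n = nToP_alt 1 := by
  unfold nToP_alt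
  norm_num [h]

-- main induction: step^[m] (1,1) matches B at n = 1 + m
theorem iterate_eq_alt (m : Nat) : ∀ (n : Int), n = 1 + (m : Int) →
    nToP_alt n = [(pvStep^[m] (1, 1)).1, (pvStep^[m] (1, 1)).2] := by
  induction m with
  | zero =>
    intro n hn
    have hn1 : n = 1 := by omega
    subst hn1
    have h := alt_char 1 1 (by norm_num) one_pos (by norm_num) (by norm_num)
    have h0 : PySem.Int.floordiv ((1 : Int) * (1 - 1)) 2 = 0 := floordiv_even _ 0 (by norm_num)
    rw [h, h0]
    norm_num
  | succ m ih =>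
    intro n hn
    have hn1 : 1 ≤ n - 1 := by omega
    obtain ⟨d, hd, hl, hr⟩ := exists_diag (n - 1) hn1
    obtain ⟨q, hq⟩ : ∃ q, (d - 1) * d = 2 * q := by
      rcases Int.even_mul_succ_self (d - 1) with ⟨q, hq⟩
      exact ⟨q, by rw [show (d - 1) * d = (d - 1) * (d - 1 + 1) from by ring, hq]; ring⟩
    have hfd : PySem.Int.floordiv (d * (d - 1)) 2 = q := floordiv_even _ q (by rw [mul_comm]; exact hq)
    have hdd : d * (d + 1) = 2 * q + 2 * d := by nlinarith
    have hIH := ih (n - 1) (by omega)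
    rw [alt_char (n - 1) d hn1 hd hl hr, hfd] at hIH
    have hp : pvStep^[m] (1, 1) = ((n - 1) - q, d - ((n - 1) - q) + 1) := by
      simp only [List.cons.injEq, and_true] at hIH
      rw [Prod.ext_iff]
      exact ⟨hIH.1.symm, hIH.2.symm⟩
    rw [Function.iterate_succ_apply', hp]
    have hklo : 1 ≤ (n - 1) - q := by omega
    have hkhi : (n - 1) - q ≤ d := by omega
    by_cases hend : n - 1 = q + d
    · -- end of diagonal: step to (1, d+1), and the diagonal of n is d+1
      rw [pvStep_end _ _ (by omega)]
      have hnew := alt_char n (d + 1) (by omega) (by omega) (by nlinarith) (by nlinarith)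
      rw [hnew, floordiv_even ((d + 1) * (d + 1 - 1)) (q + d) (by nlinarith)]
      simp only [List.cons.injEq, and_true]
      constructor <;> omega
    · -- middle of diagonal: same diagonal d for n
      rw [pvStep_mid _ _ (by omega)]
      have hnew := alt_char n d (by omega) hd (by omega) (by omega)
      rw [hnew, hfd]
      simp only [List.cons.injEq, and_true]
      constructor <;> omega

-- ===== VERDICT (by name: the statement is the Claim_ definition above) =====
theorem nToP_spec : Claim_equal_nToP := by
  intro n _
  unfold Spec_nToP
  rw [nToP_char]
  by_cases h : n < 1
  · have h0 : (n - 1).toNat = 0 := by omega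
    rw [h0, alt_clamp n h]
    exact (iterate_eq_alt 0 1 (by norm_num)).symm
  · exact (iterate_eq_alt (n - 1).toNat n (by omega)).symm
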